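-- pv_equiv track=rewrite | github.com/BaeInpyo/ProgrammingExercise | Chapter10_Greedy/Strjoin/sjw_strjoin.py | solution
-- ===== SOURCE A (Python) =====
-- import heapq
--
-- def solution(n, ls):
--     heap = ls[:]
--     heapq.heapify(heap)
--     result = 0
--
--     while len(heap) >= 4:
--         a, b, c ,d = [heapq.heappop(heap) for _ in range(4)]
--         if a + b > d:
--             # (a,b) + (c,d)
--             result += (a + b + c + d)
--             heapq.heappush(heap, a + b)
--             heapq.heappush(heap, c + d)
--         else:
--             # (a,b) + (a+b,c)
--             result += a + b
--             heapq.heappush(heap, a + b)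
--             heapq.heappush(heap, c)
--             heapq.heappush(heap, d)
--
--     if len(heap) == 3:
--         n1, n2, n3 = [heapq.heappop(heap) for _ in range(3)]
--         result += 2 * n1 + 2 * n2 + n3
--
--     else:
--         result += sum(heap)
--
--     return result
-- ===== SOURCE B (Python) =====
-- def solution(n, ls):
--     items = list(ls)
--     result = 0
--     while len(items) >= 4:
--         s = sorted(items)
--         a, b, c, d = s[:4]
--         items = s[4:]
--         if a + b > d:
--             result += a + b + c + d
--             items.append(a + b)
--             items.append(c + d)
--         else:
--             result += a + b
--             items.append(a + b)
--             items.append(c)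
--             items.append(d)
--     if len(items) == 3:
--         n1, n2, n3 = sorted(items)
--         result += 2 * n1 + 2 * n2 + n3
--     else:
--         result += sum(items)
--     return result
-- ===== Notes on version B (the rewrite author's own statement) =====
-- stated objective: alternative
-- what changed: Replaces the binary heap (heapify/heappop/heappush) with a plain list that is fully re-sorted from scratch on every iteration, slicing the four smallest off the front and appending merged values back.
import Mathlib
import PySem

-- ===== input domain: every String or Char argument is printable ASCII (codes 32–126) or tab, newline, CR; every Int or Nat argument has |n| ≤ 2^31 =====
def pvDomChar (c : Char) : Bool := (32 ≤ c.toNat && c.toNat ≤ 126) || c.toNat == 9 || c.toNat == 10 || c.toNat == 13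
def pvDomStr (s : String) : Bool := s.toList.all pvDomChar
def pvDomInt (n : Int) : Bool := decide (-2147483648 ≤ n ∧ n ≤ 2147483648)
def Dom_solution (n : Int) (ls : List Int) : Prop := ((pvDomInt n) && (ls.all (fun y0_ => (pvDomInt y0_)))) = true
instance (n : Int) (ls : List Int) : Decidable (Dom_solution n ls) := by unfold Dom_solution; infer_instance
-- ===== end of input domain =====

-- B replaces A's heap with per-iteration full re-sorting (repeated scans); alternative decomposition, not faster.

-- ===== PORT A =====
-- heapq on Int, ported by its exact observable semantics: heappop removes and returns
-- the minimum value, heappush adds an element, heapify only fixes internal layout.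
-- Elements are Ints compared by value, so the sequence of popped VALUES is exactly the
-- one CPython's binary heap produces (equal values are indistinguishable), and the heap
-- content is tracked as a list of its elements.
def heappopA : List Int → Option (Int × List Int)
  | [] => none
  | x :: xs =>
    match heappopA xs with
    | none => some (x, [])
    | some (m, ys) => if x ≤ m then some (x, xs) else some (m, x :: ys)

theorem heappopA_length : ∀ {h : List Int} {m : Int} {t : List Int},
    heappopA h = some (m, t) → t.length + 1 = h.length := by
  intro h
  induction h with
  | nil => intro m t hmt; simp [heappopA] at hmt
  | cons x xs ih =>
    intro m t hmt
    simp only [heappopA] at hmt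
    cases hp : heappopA xs with
    | none =>
      rw [hp] at hmt
      have hxs : xs = [] := by
        cases xs with
        | nil => rfl
        | cons y ys =>
          exfalso
          simp only [heappopA] at hp
          cases hq : heappopA ys with
          | none => rw [hq] at hp; simp at hp
          | some p =>
            rw [hq] at hp; obtain ⟨m', ys'⟩ := p
            by_cases hy : y ≤ m' <;> simp [hy] at hp
      subst hxs
      simp at hmt
      obtain ⟨_, h2⟩ := hmt; subst h2; rfl
    | some p =>
      obtain ⟨m', ys⟩ := p
      rw [hp] at hmt
      have hlen := ih hp
      by_cases hx : x ≤ m'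
      · simp [hx] at hmt; obtain ⟨_, h2⟩ := hmt; subst h2; rfl
      · simp [hx] at hmt; obtain ⟨_, h2⟩ := hmt; subst h2; simp; omega

-- while len(heap) >= 4: pop a,b,c,d; branch on a+b>d; push back; accumulate result.
def heapLoopA (heap : List Int) (result : Int) : List Int × Int :=
  if h4 : 4 ≤ heap.length then
    match hp1 : heappopA heap with
    | none => (heap, result)
    | some (a, h1) =>
      match hp2 : heappopA h1 with
      | none => (heap, result)
      | some (b, h2) =>
        match hp3 : heappopA h2 with
        | none => (heap, result)
        | some (c, h3) =>
          match hp4 : heappopA h3 with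
          | none => (heap, result)
          | some (d, h4') =>
            if a + b > d then
              heapLoopA (h4' ++ [a + b, c + d]) (result + (a + b + c + d))
            else
              heapLoopA (h4' ++ [a + b, c, d]) (result + (a + b))
  else (heap, result)
termination_by heap.length
decreasing_by
  · have e1 := heappopA_length hp1
    have e2 := heappopA_length hp2
    have e3 := heappopA_length hp3
    have e4 := heappopA_length hp4
    simp; omega
  · have e1 := heappopA_length hp1
    have e2 := heappopA_length hp2
    have e3 := heappopA_length hp3
    have e4 := heappopA_length hp4
    simp; omega

def solution (n : Int) (ls : List Int) : Int :=
  let st := heapLoopA ls 0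
  let heap := st.1
  let result := st.2
  if heap.length = 3 then
    match heappopA heap with
    | none => result
    | some (n1, t1) =>
      match heappopA t1 with
      | none => result
      | some (n2, t2) =>
        match heappopA t2 with
        | none => result
        | some (n3, _) => result + (2 * n1 + 2 * n2 + n3)
  else
    result + heap.sum

-- ===== PORT B =====
-- Source B: each iteration re-sorts the whole working list from scratch, takes the four
-- smallest off the front, and appends the merged values back.
def itemsLoopB (items : List Int) (result : Int) : List Int × Int :=
  if 4 ≤ items.length then
    match hs : PySem.List.sorted items (fun x => x) false with
    | a :: b :: c :: d :: rest =>
      if a + b > d then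
        itemsLoopB (rest ++ [a + b, c + d]) (result + (a + b + c + d))
      else
        itemsLoopB (rest ++ [a + b, c, d]) (result + (a + b))
    | _ => (items, result)
  else (items, result)
termination_by items.length
decreasing_by
  · have := PySem.List.length_sorted (xs := items) (key := fun x : Int => x) (rev := false)
    rw [hs] at this; simp at this ⊢; omega
  · have := PySem.List.length_sorted (xs := items) (key := fun x : Int => x) (rev := false)
    rw [hs] at this; simp at this ⊢; omega

def solution_alt (n : Int) (ls : List Int) : Int :=
  let st := itemsLoopB ls 0
  let items := st.1
  let result := st.2
  if items.length = 3 then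
    match PySem.List.sorted items (fun x => x) false with
    | n1 :: n2 :: n3 :: _ => result + (2 * n1 + 2 * n2 + n3)
    | _ => result
  else
    result + items.sum

-- ===== PRECONDITION & SPEC =====
def Spec_solution (n : Int) (ls : List Int) (out : Int) : Prop := out = solution_alt n ls
instance (n : Int) (ls : List Int) (out : Int) : Decidable (Spec_solution n ls out) := by unfold Spec_solution; infer_instance

-- ===== CLAIM (what is proved, stated in full; the proofs are below) =====
def Claim_equal_solution : Prop := ∀ (n : Int) (ls : List Int), Dom_solution n ls → Spec_solution n ls (solution n ls)

-- ===== LEMMAS AND PROOFS =====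

theorem heapLoopA_step {heap : List Int} {r a b c d : Int} {t1 t2 t3 t4 : List Int}
    (h4 : 4 ≤ heap.length)
    (hp1 : heappopA heap = some (a, t1)) (hp2 : heappopA t1 = some (b, t2))
    (hp3 : heappopA t2 = some (c, t3)) (hp4 : heappopA t3 = some (d, t4)) :
    heapLoopA heap r = if a + b > d then heapLoopA (t4 ++ [a + b, c + d]) (r + (a + b + c + d))
      else heapLoopA (t4 ++ [a + b, c, d]) (r + (a + b)) := by
  rw [heapLoopA]
  simp only [dif_pos h4]
  repeat' split
  all_goals simp_all
  all_goals omega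

theorem itemsLoopB_step {items : List Int} {r a b c d : Int} {rest : List Int}
    (hl4 : 4 ≤ items.length)
    (hsrt : PySem.List.sorted items (fun x => x) false = a :: b :: c :: d :: rest) :
    itemsLoopB items r = if a + b > d then itemsLoopB (rest ++ [a + b, c + d]) (r + (a + b + c + d))
      else itemsLoopB (rest ++ [a + b, c, d]) (r + (a + b)) := by
  rw [itemsLoopB]
  simp only [if_pos hl4]
  split
  · rename_i a' b' c' d' rest' heq
    rw [hsrt] at heq
    injection heq with h1 heq
    injection heq with h2 heq
    injection heq with h3 heq
    injection heq with h4 heq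
    subst_vars
    rfl
  · rename_i hne
    exact absurd hsrt (hne a b c d rest)

theorem heappopA_perm : ∀ {h : List Int} {m : Int} {t : List Int},
    heappopA h = some (m, t) → (m :: t).Perm h := by
  intro h
  induction h with
  | nil => intro m t hmt; simp [heappopA] at hmt
  | cons x xs ih =>
    intro m t hmt
    simp only [heappopA] at hmt
    cases hp : heappopA xs with
    | none =>
      rw [hp] at hmt
      have hxs : xs = [] := by
        cases xs with
        | nil => rfl
        | cons y ys =>
          exfalso
          simp only [heappopA] at hp
          cases hq : heappopA ys with
          | none => rw [hq] at hp; simp at hp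
          | some p =>
            rw [hq] at hp; obtain ⟨m', ys'⟩ := p
            by_cases hy : y ≤ m' <;> simp [hy] at hp
      subst hxs
      simp at hmt
      obtain ⟨h1, h2⟩ := hmt; subst_vars; rfl
    | some p =>
      obtain ⟨m', ys⟩ := p
      rw [hp] at hmt
      have hperm := ih hp
      by_cases hx : x ≤ m'
      · simp [hx] at hmt; obtain ⟨h1, h2⟩ := hmt; subst_vars; rfl
      · simp [hx] at hmt; obtain ⟨h1, h2⟩ := hmt; subst_vars
        exact (List.Perm.swap _ _ _).trans (hperm.cons _)

theorem heappopA_min : ∀ {h : List Int} {m : Int} {t : List Int},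
    heappopA h = some (m, t) → ∀ x ∈ h, m ≤ x := by
  intro h
  induction h with
  | nil => intro m t hmt; simp [heappopA] at hmt
  | cons x xs ih =>
    intro m t hmt
    simp only [heappopA] at hmt
    cases hp : heappopA xs with
    | none =>
      rw [hp] at hmt
      have hxs : xs = [] := by
        cases xs with
        | nil => rfl
        | cons y ys =>
          exfalso
          simp only [heappopA] at hp
          cases hq : heappopA ys with
          | none => rw [hq] at hp; simp at hp
          | some p =>
            rw [hq] at hp; obtain ⟨m', ys'⟩ := p
            by_cases hy : y ≤ m' <;> simp [hy] at hp
      subst hxs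
      simp at hmt
      obtain ⟨h1, _⟩ := hmt; subst_vars; simp
    | some p =>
      obtain ⟨m', ys⟩ := p
      rw [hp] at hmt
      have hmin := ih hp
      by_cases hx : x ≤ m'
      · simp [hx] at hmt; obtain ⟨h1, _⟩ := hmt; subst_vars
        intro y hy
        rcases List.mem_cons.mp hy with h | h
        · omega
        · exact le_trans hx (hmin y h)
      · simp [hx] at hmt; obtain ⟨h1, _⟩ := hmt; subst_vars
        intro y hy
        rcases List.mem_cons.mp hy with h | h
        · omega
        · exact hmin y h

-- popping from any permutation of a ≤-ordered list a :: s yields a and a permutation of s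
theorem heappopA_of_perm_sorted {h : List Int} {a : Int} {s : List Int}
    (hperm : h.Perm (a :: s)) (hsort : (a :: s).Pairwise (· ≤ ·)) :
    ∃ t, heappopA h = some (a, t) ∧ t.Perm s := by
  have hne : h ≠ [] := by
    intro he; subst he; exact absurd hperm.length_eq (by simp)
  obtain ⟨x, xs, hx⟩ := List.exists_cons_of_ne_nil hne
  have hsome : ∃ m t, heappopA h = some (m, t) := by
    subst hx
    simp only [heappopA]
    cases heappopA xs with
    | none => exact ⟨x, [], rfl⟩
    | some p =>
      obtain ⟨m', ys⟩ := p
      by_cases hle : x ≤ m'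
      · exact ⟨x, xs, by simp [hle]⟩
      · exact ⟨m', x :: ys, by simp [hle]⟩
  obtain ⟨m, t, hmt⟩ := hsome
  have hmem : m ∈ h := (heappopA_perm hmt).mem_iff.mp (List.mem_cons_self ..)
  have hma : a ≤ m := by
    rcases List.mem_cons.mp (hperm.mem_iff.mp hmem) with he | hs'
    · omega
    · exact (List.pairwise_cons.mp hsort).1 m hs'
  have ham : m ≤ a := heappopA_min hmt a (hperm.mem_iff.mpr (List.mem_cons_self ..))
  have hma' : m = a := le_antisymm ham hma
  subst hma'
  refine ⟨t, hmt, ?_⟩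
  exact ((heappopA_perm hmt).trans hperm).cons_inv

theorem loop_eq : ∀ (N : Nat) (h l : List Int) (r : Int), h.length ≤ N → h.Perm l →
    (heapLoopA h r).2 = (itemsLoopB l r).2 ∧ (heapLoopA h r).1.Perm (itemsLoopB l r).1 := by
  intro N
  induction N with
  | zero =>
    intro h l r hlen hperm
    have h4 : ¬ 4 ≤ h.length := by omega
    have hl4 : ¬ 4 ≤ l.length := hperm.length_eq ▸ h4
    rw [heapLoopA, itemsLoopB]
    simp only [dif_neg h4, if_neg hl4]
    exact ⟨by trivial, hperm⟩
  | succ N ih =>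
    intro h l r hlen hperm
    by_cases h4 : 4 ≤ h.length
    · have hl4 : 4 ≤ l.length := hperm.length_eq ▸ h4
      have hsp : (PySem.List.sorted l (fun x => x) false).Perm l :=
        PySem.List.sorted_perm ..
      have hslen : (PySem.List.sorted l (fun x => x) false).length = l.length :=
        hsp.length_eq
      obtain ⟨a, b, c, d, rest, hs⟩ :
          ∃ a b c d rest, PySem.List.sorted l (fun x => x) false = a :: b :: c :: d :: rest := by
        match hm : PySem.List.sorted l (fun x => x) false with
        | a :: b :: c :: d :: rest => exact ⟨a, b, c, d, rest, rfl⟩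
        | [] | [_] | [_, _] | [_, _, _] => rw [hm] at hslen; simp at hslen; omega
      have hpw : (a :: b :: c :: d :: rest).Pairwise (· ≤ ·) := by
        have := PySem.List.sorted_pairwise (xs := l) (key := fun x : Int => x)
        rw [hs] at this
        simpa using this
      have hhs : h.Perm (a :: b :: c :: d :: rest) := hperm.trans (hs ▸ hsp.symm)
      obtain ⟨t1, hp1, hq1⟩ := heappopA_of_perm_sorted hhs hpw
      obtain ⟨t2, hp2, hq2⟩ := heappopA_of_perm_sorted hq1 hpw.of_cons
      obtain ⟨t3, hp3, hq3⟩ := heappopA_of_perm_sorted hq2 hpw.of_cons.of_cons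
      obtain ⟨t4, hp4, hq4⟩ := heappopA_of_perm_sorted hq3 hpw.of_cons.of_cons.of_cons
      have hlt4 : t4.length + 4 = h.length := by
        have e1 := heappopA_length hp1
        have e2 := heappopA_length hp2
        have e3 := heappopA_length hp3
        have e4 := heappopA_length hp4
        omega
      rw [heapLoopA_step h4 hp1 hp2 hp3 hp4, itemsLoopB_step hl4 hs]
      by_cases hcond : a + b > d
      · simp only [if_pos hcond]
        exact ih _ _ _ (by simp at hlt4 ⊢; omega) (hq4.append_right [a + b, c + d])
      · simp only [if_neg hcond]
        exact ih _ _ _ (by simp at hlt4 ⊢; omega) (hq4.append_right [a + b, c, d])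
    · have hl4 : ¬ 4 ≤ l.length := hperm.length_eq ▸ h4
      rw [heapLoopA, itemsLoopB]
      simp only [dif_neg h4, if_neg hl4]
      exact ⟨by trivial, hperm⟩

-- ===== VERDICT (by name: the statement is the Claim_ definition above) =====
theorem solution_spec : Claim_equal_solution := by
  intro n ls _
  unfold Spec_solution solution solution_alt
  obtain ⟨hres, hpm⟩ := loop_eq ls.length ls ls 0 le_rfl (List.Perm.refl ls)
  set stA := heapLoopA ls 0 with hA
  set stB := itemsLoopB ls 0 with hB
  have hlen : stA.1.length = stB.1.length := hpm.length_eq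
  by_cases h3 : stA.1.length = 3
  · have h3' : stB.1.length = 3 := by omega
    simp only [if_pos h3, if_pos h3']
    have hsp : (PySem.List.sorted stB.1 (fun x => x) false).Perm stB.1 :=
      PySem.List.sorted_perm ..
    have hslen : (PySem.List.sorted stB.1 (fun x => x) false).length = 3 :=
      hsp.length_eq.trans h3'
    obtain ⟨n1, n2, n3, hs⟩ :
        ∃ n1 n2 n3, PySem.List.sorted stB.1 (fun x => x) false = [n1, n2, n3] := by
      match hm : PySem.List.sorted stB.1 (fun x => x) false with
      | [x1, x2, x3] => exact ⟨x1, x2, x3, rfl⟩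
      | [] | [_] | [_, _] | _ :: _ :: _ :: _ :: _ => rw [hm] at hslen; simp at hslen
    have hpw : ([n1, n2, n3] : List Int).Pairwise (· ≤ ·) := by
      have := PySem.List.sorted_pairwise (xs := stB.1) (key := fun x : Int => x)
      rw [hs] at this
      simpa using this
    have hhs : stA.1.Perm [n1, n2, n3] := hpm.trans (hs ▸ hsp.symm)
    obtain ⟨t1, hp1, hq1⟩ := heappopA_of_perm_sorted hhs hpw
    obtain ⟨t2, hp2, hq2⟩ := heappopA_of_perm_sorted hq1 hpw.of_cons
    obtain ⟨t3, hp3, hq3⟩ := heappopA_of_perm_sorted hq2 hpw.of_cons.of_cons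
    simp only [hs, hp1, hp2, hp3, hres]
  · have h3' : ¬ stB.1.length = 3 := by omega
    simp only [if_neg h3, if_neg h3']
    rw [hres, hpm.sum_eq]
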